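-- pv_equiv track=rewrite | github.com/artemabalmasov/aoc2024 | aoc-2024-python/day9p2.py | find_best_space
-- ===== SOURCE A (Python) =====
-- from typing import List, Tuple, Dict
--
-- def find_best_space(blocks: List[int], file_length: int, end_pos: int) -> int:
--     """Find leftmost adequate space before end_pos."""
--     current_space = 0
--     best_start = None
--
--     for pos in range(end_pos):
--         if blocks[pos] == -1:
--             current_space += 1
--             if current_space >= file_length and best_start is None:
--                 best_start = pos - current_space + 1
--         else:
--             current_space = 0
--
--     return best_start
-- ===== SOURCE B (Python) =====
-- def find_best_space(blocks, file_length, end_pos):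
--     """Brute force: slide a window over the prefix and compare it to an all-gap block."""
--     need = max(file_length, 1)
--     window = blocks[:max(end_pos, 0)]
--     start = 0
--     while len(window) >= need:
--         if window[:need] == [-1] * need:
--             return start
--         window = window[1:]
--         start += 1
--     return None
-- ===== Notes on version B (the rewrite author's own statement) =====
-- stated objective: alternative
-- what changed: B replaces A's streaming reset-counter scan by a brute-force sliding window: it takes the prefix blocks[:end_pos] and compares each length-need window against an all-gap block [-1]*need, returning the first matching start; A instead counts consecutive gaps and back-computes pos - current_space + 1.
import Mathlib
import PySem

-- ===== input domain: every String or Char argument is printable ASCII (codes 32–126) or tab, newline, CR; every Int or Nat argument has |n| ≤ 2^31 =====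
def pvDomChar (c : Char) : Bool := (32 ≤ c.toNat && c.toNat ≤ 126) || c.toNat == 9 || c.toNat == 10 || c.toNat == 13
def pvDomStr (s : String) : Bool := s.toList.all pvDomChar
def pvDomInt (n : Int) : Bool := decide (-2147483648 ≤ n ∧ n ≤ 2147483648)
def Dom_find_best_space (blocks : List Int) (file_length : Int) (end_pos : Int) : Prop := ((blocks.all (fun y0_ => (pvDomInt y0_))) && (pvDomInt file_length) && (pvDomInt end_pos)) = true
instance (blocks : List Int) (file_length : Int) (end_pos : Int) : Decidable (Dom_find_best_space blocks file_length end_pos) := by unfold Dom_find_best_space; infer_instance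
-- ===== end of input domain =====

-- B replaces A's streaming reset-counter scan by a brute-force sliding window compared
-- against an all-gap block; equivalence is about the return value (nothing is mutated).

-- ===== PORT A =====
-- for pos in range(end_pos): reset-counter scan; state = (current_space, best_start).
-- blocks[pos] is pyGet?; the 'none' arm (Python IndexError) keeps the state and is excluded by Pre_.
def find_best_space (blocks : List Int) (file_length : Int) (end_pos : Int) : Option Int :=
  ((PySem.List.pyRange 0 end_pos 1).foldl
    (fun (st : Int × Option Int) pos =>
      match PySem.List.pyGet? blocks pos with
      | some v =>
        if v = -1 then
          let cs := st.1 + 1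
          if cs ≥ file_length ∧ st.2 = none then (cs, some (pos - cs + 1)) else (cs, st.2)
        else (0, st.2)
      | none => st)
    (0, none)).2

-- ===== PORT B =====
-- the while loop of Source B: shrink the window by one each round; 'window[:need] == [-1]*need'
-- is take/replicate; the loop is only reached with need ≥ 1, so [] means len(window) < need → None
def pvWf (need : Nat) : Int → List Int → Option Int
  | _, [] => none
  | start, x :: t =>
    if need ≤ (x :: t).length then
      if (x :: t).take need = List.replicate need (-1) then some start
      else pvWf need (start + 1) t
    else none

-- need = max(file_length, 1) ≥ 1 so .toNat is exact; blocks[:max(end_pos,0)] with a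
-- nonnegative bound is exactly List.take of that bound
def find_best_space_alt (blocks : List Int) (file_length : Int) (end_pos : Int) : Option Int :=
  pvWf (max file_length 1).toNat 0 (blocks.take (max end_pos 0).toNat)

-- ===== PRECONDITION & SPEC =====
-- Python A indexes blocks[pos] for every pos in range(end_pos): it raises IndexError iff end_pos > len(blocks).
def Pre_find_best_space (blocks : List Int) (_file_length : Int) (end_pos : Int) : Prop :=
  end_pos ≤ (blocks.length : Int)
instance (blocks : List Int) (file_length : Int) (end_pos : Int) : Decidable (Pre_find_best_space blocks file_length end_pos) := by unfold Pre_find_best_space; infer_instance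

def pvWitness_find_best_space : List Int × Int × Int := ([0, -1, -1, 0, -1], 2, 4)

def Spec_find_best_space (blocks : List Int) (file_length : Int) (end_pos : Int) (out : Option Int) : Prop := out = find_best_space_alt blocks file_length end_pos
instance (blocks : List Int) (file_length : Int) (end_pos : Int) (out : Option Int) : Decidable (Spec_find_best_space blocks file_length end_pos out) := by unfold Spec_find_best_space; infer_instance

-- ===== CLAIM (what is proved, stated in full; the proofs are below) =====
def Claim_equal_find_best_space : Prop := ∀ (blocks : List Int) (file_length : Int) (end_pos : Int), Dom_find_best_space blocks file_length end_pos → Pre_find_best_space blocks file_length end_pos → Spec_find_best_space blocks file_length end_pos (find_best_space blocks file_length end_pos)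

-- ===== LEMMAS AND PROOFS =====

-- A's loop as a structural recursion over the scanned prefix, with p the current absolute index
def pvAuxA (fl : Int) : Int → Int → Option Int → List Int → Option Int
  | _, _, bs, [] => bs
  | p, cs, bs, x :: xs =>
    if x = -1 then
      if cs + 1 ≥ fl ∧ bs = none then pvAuxA fl (p + 1) (cs + 1) (some (p - (cs + 1) + 1)) xs
      else pvAuxA fl (p + 1) (cs + 1) bs xs
    else pvAuxA fl (p + 1) 0 bs xs

theorem pvAuxA_some (fl : Int) (xs : List Int) : ∀ (p cs : Int) (b : Int),
    pvAuxA fl p cs (some b) xs = some b := by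
  induction xs with
  | nil => intro p cs b; rfl
  | cons x xs ih =>
    intro p cs b
    simp only [pvAuxA]
    split
    · simp [ih]
    · exact ih _ _ _

theorem pvWf_none (need : Nat) (q : Int) (w : List Int) (h : w.length < need) :
    pvWf need q w = none := by
  cases w with
  | nil => rfl
  | cons x t => simp only [pvWf]; rw [if_neg (by omega)]

-- skipping the first c+1 windows, each of which contains the non-gap x
theorem pvWf_skip (need : Nat) (x : Int) (hx : x ≠ -1) (xs : List Int) :
    ∀ (c : Nat) (q : Int), c < need →
    pvWf need q (List.replicate c (-1) ++ x :: xs) = pvWf need (q + c + 1) xs := by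
  intro c
  induction c with
  | zero =>
    intro q hc
    simp only [List.replicate, List.nil_append]
    by_cases hlen : need ≤ (x :: xs).length
    · have hne : (x :: xs).take need ≠ List.replicate need (-1) := by
        intro heq
        have hx' : x ∈ (x :: xs).take need := by
          have : 0 < need := by omega
          cases need with
          | zero => omega
          | succ m => simp [List.take_succ_cons]
        rw [heq] at hx'
        exact hx (List.eq_of_mem_replicate hx')
      simp only [pvWf]
      rw [if_pos hlen, if_neg hne]
      norm_num
    · rw [pvWf_none need q _ (by simp at hlen ⊢; omega),
        pvWf_none need _ xs (by simp at hlen ⊢; omega)]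
  | succ c ih =>
    intro q hc
    have hrep : List.replicate (c + 1) (-1 : Int) ++ x :: xs
        = -1 :: (List.replicate c (-1) ++ x :: xs) := by
      simp [List.replicate]
    rw [hrep]
    by_cases hlen : need ≤ (-1 :: (List.replicate c (-1) ++ x :: xs)).length
    · have hne : (-1 :: (List.replicate c (-1) ++ x :: xs)).take need
          ≠ List.replicate need (-1) := by
        intro heq
        have hx' : x ∈ (-1 :: (List.replicate c (-1) ++ x :: xs)).take need := by
          have h1 : (-1 :: (List.replicate c (-1) ++ x :: xs))
              = List.replicate (c + 1) (-1) ++ x :: xs := hrep.symm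
          rw [h1, List.take_append]
          have h2 : (List.replicate (c + 1) (-1 : Int)).length = c + 1 := by simp
          have h3 : 1 ≤ need - (List.replicate (c + 1) (-1 : Int)).length := by
            rw [h2]; omega
          apply List.mem_append_right
          cases htk : need - (List.replicate (c + 1) (-1 : Int)).length with
          | zero => omega
          | succ m => simp [List.take_succ_cons]
        rw [heq] at hx'
        exact hx (List.eq_of_mem_replicate hx')
      simp only [pvWf]
      rw [if_pos hlen, if_neg hne, ih (q + 1) (by omega)]
      congr 1; push_cast; ring
    · rw [pvWf_none need q _ (by omega),
        pvWf_none need _ xs (by simp at hlen ⊢; omega)]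

-- the key invariant: A mid-scan with cs pending gap cells equals B's window scan
-- on those pending cells prepended to the rest, provided the threshold is not yet reached
theorem pvAuxA_eq_wf (fl : Int) (xs : List Int) : ∀ (p : Int) (c : Nat), (c : Int) < max fl 1 →
    pvAuxA fl p (c : Int) none xs
      = pvWf (max fl 1).toNat (p - c) (List.replicate c (-1) ++ xs) := by
  have hneed : ((max fl 1).toNat : Int) = max fl 1 := by omega
  induction xs with
  | nil =>
    intro p c hc
    rw [List.append_nil, pvWf_none _ _ _ (by simp; omega)]
    rfl
  | cons x xs ih =>
    intro p c hc
    by_cases hx : x = -1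
    · subst hx
      have hrep : List.replicate c (-1 : Int) ++ -1 :: xs
          = List.replicate (c + 1) (-1) ++ xs := by
        rw [List.replicate_succ']; simp
      by_cases hge : (c : Int) + 1 ≥ max fl 1
      · -- threshold reached: A records p - c, B's current window is all gaps
        have hceq : (c : Int) + 1 = max fl 1 := by omega
        have hfl : (c : Int) + 1 ≥ fl := by omega
        have e1 : pvAuxA fl p (c : Int) none (-1 :: xs)
            = pvAuxA fl (p + 1) ((c : Int) + 1) (some (p - ((c : Int) + 1) + 1)) xs := by
          simp [pvAuxA, hfl]
        rw [e1, pvAuxA_some]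
        have hn : (max fl 1).toNat = c + 1 := by omega
        rw [hrep, hn]
        have hcons : List.replicate (c + 1) (-1 : Int) ++ xs
            = -1 :: (List.replicate c (-1) ++ xs) := by simp [List.replicate]
        rw [hcons]
        simp only [pvWf]
        rw [if_pos (by simp), if_pos ?_]
        · congr 1; omega
        · rw [← hcons, List.take_append_of_le_length (by simp), List.take_replicate]
          simp
      · -- still below threshold: same window list, one more pending gap
        have hfl : ¬ ((c : Int) + 1 ≥ fl) := by omega
        have e1 : pvAuxA fl p (c : Int) none (-1 :: xs)
            = pvAuxA fl (p + 1) ((c : Int) + 1) none xs := by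
          simp [pvAuxA, hfl]
        have hcast : ((c : Int) + 1) = ((c + 1 : Nat) : Int) := by push_cast; ring
        rw [e1, hcast, ih (p + 1) (c + 1) (by push_cast; omega), hrep]
        congr 1; push_cast; ring
    · -- non-gap cell: A resets, B skips the c+1 windows that contain x
      have e1 : pvAuxA fl p (c : Int) none (x :: xs) = pvAuxA fl (p + 1) 0 none xs := by
        simp [pvAuxA, hx]
      have h0 : ((0 : Nat) : Int) = (0 : Int) := rfl
      rw [e1, show (0 : Int) = ((0 : Nat) : Int) from rfl,
        ih (p + 1) 0 (by omega),
        pvWf_skip _ x hx xs c (p - c) (by omega)]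
      simp only [List.replicate, List.nil_append]
      norm_num

-- A's pyRange fold over [k, k+n) equals pvAuxA on the corresponding segment of blocks
theorem find_best_space_fold (blocks : List Int) (fl : Int) : ∀ (n : Nat) (k cs : Int) (bs : Option Int),
    0 ≤ k → k + n ≤ blocks.length →
    ((PySem.List.pyRange k (k + n) 1).foldl
      (fun (st : Int × Option Int) pos =>
        match PySem.List.pyGet? blocks pos with
        | some v =>
          if v = -1 then
            if st.1 + 1 ≥ fl ∧ st.2 = none then (st.1 + 1, some (pos - (st.1 + 1) + 1)) else (st.1 + 1, st.2)
          else (0, st.2)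
        | none => st)
      (cs, bs)).2 = pvAuxA fl k cs bs ((blocks.drop k.toNat).take n) := by
  intro n
  induction n with
  | zero =>
    intro k cs bs hk hlen
    rw [PySem.List.pyRange_one_eq_nil (by omega)]
    simp [pvAuxA]
  | succ n ih =>
    intro k cs bs hk hlen
    have hklt : k.toNat < blocks.length := by omega
    have hcast : k + ((n + 1 : Nat) : Int) = k + 1 + (n : Int) := by push_cast; ring
    rw [hcast, PySem.List.pyRange_one_cons (by omega : k < k + 1 + (n : Int))]
    have hget : PySem.List.pyGet? blocks k = some blocks[k.toNat] := by
      rw [PySem.List.pyGet?_of_nonneg blocks hk]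
      simp [hklt]
    have hdrop : blocks.drop k.toNat = blocks[k.toNat] :: blocks.drop (k.toNat + 1) :=
      List.drop_eq_getElem_cons hklt
    have htonat : (k + 1).toNat = k.toNat + 1 := by omega
    simp only [List.foldl_cons, hget, hdrop, List.take_succ_cons, pvAuxA]
    by_cases hv : blocks[k.toNat] = -1
    · simp only [hv, reduceIte]
      by_cases hcond : cs + 1 ≥ fl ∧ bs = none
      · rw [if_pos hcond, if_pos hcond,
          ih (k + 1) (cs + 1) _ (by omega) (by push_cast at hlen ⊢; omega), htonat]
      · rw [if_neg hcond, if_neg hcond,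
          ih (k + 1) (cs + 1) bs (by omega) (by push_cast at hlen ⊢; omega), htonat]
    · rw [if_neg hv, if_neg hv,
        ih (k + 1) 0 bs (by omega) (by push_cast at hlen ⊢; omega), htonat]

-- ===== VERDICT (by name: the statement is the Claim_ definition above) =====
theorem find_best_space_spec : Claim_equal_find_best_space := by
  intro blocks fl ep _ hpre
  unfold Spec_find_best_space find_best_space find_best_space_alt
  have hPre : ep ≤ (blocks.length : Int) := hpre
  have hmax : (max ep 0).toNat = ep.toNat := by omega
  have h0 : (0 : Int) + (ep.toNat : Int) = ep ∨ ep ≤ 0 := by omega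
  rcases h0 with h0 | h0
  · have := find_best_space_fold blocks fl ep.toNat 0 0 none le_rfl (by omega)
    rw [h0] at this
    rw [this]
    simp only [Int.toNat_zero, List.drop_zero]
    have := pvAuxA_eq_wf fl (blocks.take ep.toNat) 0 0 (by omega)
    simp only [Nat.cast_zero, List.replicate, List.nil_append, sub_zero] at this
    rw [this, hmax]
  · rw [PySem.List.pyRange_one_eq_nil (by omega)]
    have h1 : (max ep 0).toNat = 0 := by omega
    simp [h1, pvWf]
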